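-- pv_equiv track=rewrite | github.com/ChiuTeHao/Fakenews | landslide.py | variant_word_handle_dict
-- ===== SOURCE A (Python) =====
-- def variant_word_handle_dict(dict_, pair_list):
--     list_ = dict_.keys()
--     change_0 = [x[0] for x in pair_list]
--     change_1 = [x[1] for x in pair_list]
--     ch_target_0 = [[x for x in list_ if i in x] for i in change_0]
--     ch_target_1 = [[x for x in list_ if i in x] for i in change_1]
--     for idx in range(len(pair_list)):
--         for _it in ch_target_0[idx]:
--             _it_new = _it.replace(pair_list[idx][0],pair_list[idx][1])
--             if _it_new not in dict_.keys():
--                 dict_[_it_new] = dict_[_it]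
--     for idx in range(len(pair_list)):
--         for _it in ch_target_1[idx]:
--             _it_new = _it.replace(pair_list[idx][1],pair_list[idx][0])
--             if _it_new not in dict_.keys():
--                 dict_[_it_new] = dict_[_it]
--     return dict_
-- ===== SOURCE B (Python) =====
-- def variant_word_handle_dict(dict_, pair_list):
--     # Same return value as A; mutates dict_ in place just as A does.
--     orig = list(dict_)
--     # inverted index: character -> original keys containing it, in key order
--     index = {}
--     for k in orig:
--         for c in dict.fromkeys(k):
--             index.setdefault(c, []).append(k)
--     # one fused loop: forward substitutions for all pairs, then backward ones
--     for a, b in list(pair_list) + [(q[1], q[0]) for q in pair_list]: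
--         candidates = orig if a == "" else index.get(a[0], [])
--         for k in candidates:
--             if a in k:
--                 nk = k.replace(a, b)
--                 if nk not in dict_:
--                     dict_[nk] = dict_[k]
--     return dict_
-- ===== Notes on version B (the rewrite author's own statement) =====
-- stated objective: faster
-- what changed: Instead of A's two precomputed pass-per-pair scans over every key (substring-testing all keys for each pair and direction), B builds one inverted index from first characters to the ordered list of original keys containing them in a single pass, then for each direction of each pair only scans the keys containing the pattern's first character, fused into one loop over both substitution directions.
import Mathlib
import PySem

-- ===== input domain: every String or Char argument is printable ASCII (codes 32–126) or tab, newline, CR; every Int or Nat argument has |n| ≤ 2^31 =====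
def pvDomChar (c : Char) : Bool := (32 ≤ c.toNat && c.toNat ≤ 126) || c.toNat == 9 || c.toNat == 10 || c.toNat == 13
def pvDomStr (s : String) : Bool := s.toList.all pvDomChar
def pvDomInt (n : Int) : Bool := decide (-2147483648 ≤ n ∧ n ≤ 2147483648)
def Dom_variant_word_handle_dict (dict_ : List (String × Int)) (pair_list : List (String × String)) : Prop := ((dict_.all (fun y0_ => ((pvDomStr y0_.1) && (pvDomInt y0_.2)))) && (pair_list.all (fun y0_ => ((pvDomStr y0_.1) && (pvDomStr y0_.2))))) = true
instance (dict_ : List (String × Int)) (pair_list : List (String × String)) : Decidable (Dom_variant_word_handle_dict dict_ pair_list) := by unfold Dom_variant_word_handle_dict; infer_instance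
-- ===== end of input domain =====

-- B replaces A's per-pair scans over all keys by a one-pass inverted index (first character → keys)
-- fused into a single loop over both substitution directions; same return value (both Pythons also
-- mutate dict_ in place identically — the equivalence proved here is about the returned dict).

-- ===== PORT A =====
-- literal transliteration of A; dict_[_it] is ported as getD _ _ 0: _it is an original key, always present,
-- and the idx lookups use pyGetD since idx ∈ range(len(pair_list)) is always in range
def variant_word_handle_dict (dict_ : List (String × Int)) (pair_list : List (String × String)) : List (String × Int) :=
  let d0 : PySem.Dict String Int := PySem.Dict.mk dict_
  let list_ := d0.keys
  let change_0 := pair_list.map (fun x => x.1)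
  let change_1 := pair_list.map (fun x => x.2)
  let ch_target_0 := change_0.map (fun i => list_.filter (fun x => PySem.Str.isIn i x))
  let ch_target_1 := change_1.map (fun i => list_.filter (fun x => PySem.Str.isIn i x))
  let d1 := (PySem.List.pyRange 0 (pair_list.length : Int) 1).foldl (fun d idx =>
    (PySem.List.pyGetD ch_target_0 idx []).foldl (fun d _it =>
      let p := PySem.List.pyGetD pair_list idx ("", "")
      let _it_new := PySem.Str.replace _it p.1 p.2
      if d.contains _it_new then d
      else d.insert _it_new (d.getD _it 0)) d) d0
  let d2 := (PySem.List.pyRange 0 (pair_list.length : Int) 1).foldl (fun d idx =>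
    (PySem.List.pyGetD ch_target_1 idx []).foldl (fun d _it =>
      let p := PySem.List.pyGetD pair_list idx ("", "")
      let _it_new := PySem.Str.replace _it p.2 p.1
      if d.contains _it_new then d
      else d.insert _it_new (d.getD _it 0)) d) d1
  d2.items

-- ===== PORT B =====
-- literal transliteration of Source B; index.setdefault(c, []).append(k) is Dict.modify c [] (· ++ [k]);
-- iterating dict.fromkeys(k) is PySem.List.dedup k.toList (Python's 1-char strings are Char here);
-- a[0] of the nonempty a is ab.1.toList.headD ' '
def variant_word_handle_dict_alt (dict_ : List (String × Int)) (pair_list : List (String × String)) : List (String × Int) :=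
  let d0 : PySem.Dict String Int := PySem.Dict.mk dict_
  let orig := d0.keys
  let index : PySem.Dict Char (List String) :=
    orig.foldl (fun ix k =>
      (PySem.List.dedup k.toList).foldl (fun ix c => ix.modify c [] (fun l => l ++ [k])) ix)
      PySem.Dict.empty
  let dirs := pair_list ++ pair_list.map (fun q => (q.2, q.1))
  let dfin := dirs.foldl (fun d ab =>
    let candidates := if ab.1 = "" then orig else index.getD (ab.1.toList.headD ' ') []
    candidates.foldl (fun d k =>
      if PySem.Str.isIn ab.1 k then
        let nk := PySem.Str.replace k ab.1 ab.2
        if d.contains nk then d else d.insert nk (d.getD k 0)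
      else d) d) d0
  dfin.items

-- ===== PRECONDITION & SPEC =====
def Spec_variant_word_handle_dict (dict_ : List (String × Int)) (pair_list : List (String × String)) (out : List (String × Int)) : Prop := out = variant_word_handle_dict_alt dict_ pair_list
instance (dict_ : List (String × Int)) (pair_list : List (String × String)) (out : List (String × Int)) : Decidable (Spec_variant_word_handle_dict dict_ pair_list out) := by unfold Spec_variant_word_handle_dict; infer_instance

-- ===== CLAIM (what is proved, stated in full; the proofs are below) =====
def Claim_equal_variant_word_handle_dict : Prop := ∀ (dict_ : List (String × Int)) (pair_list : List (String × String)), Dom_variant_word_handle_dict dict_ pair_list → Spec_variant_word_handle_dict dict_ pair_list (variant_word_handle_dict dict_ pair_list)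

-- ===== LEMMAS AND PROOFS =====

-- the substitution step both programs perform on a matching key k (direction ab: replace ab.1 by ab.2)
def pvBody (ab : String × String) (d : PySem.Dict String Int) (k : String) : PySem.Dict String Int :=
  let nk := PySem.Str.replace k ab.1 ab.2
  if d.contains nk then d else d.insert nk (d.getD k 0)

-- one direction of the substitution pass, phrased over the original key list
def pvG (orig : List String) (ab : String × String) (d : PySem.Dict String Int) : PySem.Dict String Int :=
  (orig.filter (fun k => PySem.Str.isIn ab.1 k)).foldl (pvBody ab) d

-- a nonempty substring forces its first character into the containing string
theorem pvIsIn_head (a k : String) (c : Char) (rest : List Char) (hc : a.toList = c :: rest)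
    (h : PySem.Str.isIn a k = true) : k.toList.contains c = true := by
  rw [PySem.Str.isIn_iff_infix] at h
  have : c ∈ k.toList := h.subset (by rw [hc]; exact List.mem_cons_self)
  simpa using this

-- the inner index-building loop: effect on one bucket
theorem pvInner_getD (k : String) (cs : List Char) (ix : PySem.Dict Char (List String)) (c : Char)
    (h : cs.Nodup) :
    (cs.foldl (fun ix c' => ix.modify c' [] (fun l => l ++ [k])) ix).getD c []
      = ix.getD c [] ++ (if c ∈ cs then [k] else []) := by
  induction cs generalizing ix with
  | nil => simp
  | cons c' t ih =>
    simp only [List.foldl_cons]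
    rw [ih _ (h.of_cons)]
    rw [PySem.Dict.getD_modify]
    by_cases hcc : c = c'
    · subst hcc
      have : c ∉ t := (List.nodup_cons.mp h).1
      simp [this]
    · simp [hcc, List.mem_cons]

-- the inverted index holds exactly the keys containing each character, in key order
theorem pvIndex_getD (os : List String) (ix : PySem.Dict Char (List String)) (c : Char) :
    ((os.foldl (fun ix k =>
        (PySem.List.dedup k.toList).foldl (fun ix c' => ix.modify c' [] (fun l => l ++ [k])) ix) ix).getD c [])
      = ix.getD c [] ++ os.filter (fun k => k.toList.contains c) := by
  induction os generalizing ix with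
  | nil => simp
  | cons k t ih =>
    simp only [List.foldl_cons]
    rw [ih]
    rw [pvInner_getD k _ ix c (PySem.List.nodup_dedup _)]
    rw [List.filter_cons]
    by_cases hm : c ∈ k.toList
    · simp [hm, List.append_assoc]
    · simp [hm]

-- A's result as a single fold of pvG over both substitution directions
theorem pvA_eq (dict_ : List (String × Int)) (pair_list : List (String × String)) :
    variant_word_handle_dict dict_ pair_list
      = ((pair_list ++ pair_list.map (fun q => (q.2, q.1))).foldl
          (fun d ab => pvG (PySem.Dict.mk dict_).keys ab d) (PySem.Dict.mk dict_)).items := by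
  unfold variant_word_handle_dict
  refine congrArg PySem.Dict.items ?_
  rw [List.foldl_append, List.foldl_map]
  have h1 : ∀ init : PySem.Dict String Int,
      (PySem.List.pyRange 0 (pair_list.length : Int) 1).foldl (fun d idx =>
        (PySem.List.pyGetD ((pair_list.map (fun x => x.1)).map
            (fun i => (PySem.Dict.mk dict_).keys.filter (fun x => PySem.Str.isIn i x))) idx []).foldl
          (fun d _it =>
            let p := PySem.List.pyGetD pair_list idx ("", "")
            let _it_new := PySem.Str.replace _it p.1 p.2
            if d.contains _it_new then d
            else d.insert _it_new (d.getD _it 0)) d) init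
      = pair_list.foldl (fun d p => pvG (PySem.Dict.mk dict_).keys p d) init := by
    intro init
    refine Eq.trans (PySem.List.foldl_congr_mem _ _
      (fun acc j => pvG (PySem.Dict.mk dict_).keys (PySem.List.pyGetD pair_list j ("", "")) acc) init ?_)
      (PySem.List.foldl_pyRange_zero_pyGetD' pair_list ("", "")
        (fun d p => pvG (PySem.Dict.mk dict_).keys p d) init)
    intro d idx hidx
    obtain ⟨h0, hn⟩ := PySem.List.mem_pyRange_one.mp hidx
    obtain ⟨j, rfl⟩ : ∃ j : Nat, idx = (j : Int) := ⟨idx.toNat, (Int.toNat_of_nonneg h0).symm⟩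
    have hj : j < pair_list.length := by exact_mod_cast hn
    beta_reduce
    rw [PySem.List.pyGetD_natCast, PySem.List.pyGetD_natCast]
    simp only [List.getD_eq_getElem?_getD, List.getElem?_map, List.getElem?_eq_getElem hj,
      Option.map_some, Option.getD_some]
    rfl
  have h2 : ∀ init : PySem.Dict String Int,
      (PySem.List.pyRange 0 (pair_list.length : Int) 1).foldl (fun d idx =>
        (PySem.List.pyGetD ((pair_list.map (fun x => x.2)).map
            (fun i => (PySem.Dict.mk dict_).keys.filter (fun x => PySem.Str.isIn i x))) idx []).foldl
          (fun d _it =>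
            let p := PySem.List.pyGetD pair_list idx ("", "")
            let _it_new := PySem.Str.replace _it p.2 p.1
            if d.contains _it_new then d
            else d.insert _it_new (d.getD _it 0)) d) init
      = pair_list.foldl (fun d p => pvG (PySem.Dict.mk dict_).keys (p.2, p.1) d) init := by
    intro init
    refine Eq.trans (PySem.List.foldl_congr_mem _ _
      (fun acc j => pvG (PySem.Dict.mk dict_).keys
        ((PySem.List.pyGetD pair_list j ("", "")).2, (PySem.List.pyGetD pair_list j ("", "")).1) acc) init ?_)
      (PySem.List.foldl_pyRange_zero_pyGetD' pair_list ("", "")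
        (fun d p => pvG (PySem.Dict.mk dict_).keys (p.2, p.1) d) init)
    intro d idx hidx
    obtain ⟨h0, hn⟩ := PySem.List.mem_pyRange_one.mp hidx
    obtain ⟨j, rfl⟩ : ∃ j : Nat, idx = (j : Int) := ⟨idx.toNat, (Int.toNat_of_nonneg h0).symm⟩
    have hj : j < pair_list.length := by exact_mod_cast hn
    beta_reduce
    rw [PySem.List.pyGetD_natCast, PySem.List.pyGetD_natCast]
    simp only [List.getD_eq_getElem?_getD, List.getElem?_map, List.getElem?_eq_getElem hj,
      Option.map_some, Option.getD_some]
    rfl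
  rw [h1, h2]

-- B's result as the same fold
theorem pvB_eq (dict_ : List (String × Int)) (pair_list : List (String × String)) :
    variant_word_handle_dict_alt dict_ pair_list
      = ((pair_list ++ pair_list.map (fun q => (q.2, q.1))).foldl
          (fun d ab => pvG (PySem.Dict.mk dict_).keys ab d) (PySem.Dict.mk dict_)).items := by
  unfold variant_word_handle_dict_alt
  refine congrArg PySem.Dict.items ?_
  refine PySem.List.foldl_congr_mem _ _ _ _ ?_
  intro d ab _
  have hstep : (fun (d : PySem.Dict String Int) (k : String) =>
      if PySem.Str.isIn ab.1 k = true then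
        let nk := PySem.Str.replace k ab.1 ab.2
        if d.contains nk = true then d else d.insert nk (d.getD k 0)
      else d) = (fun d k => if PySem.Str.isIn ab.1 k = true then pvBody ab d k else d) := rfl
  by_cases he : ab.1 = ""
  · simp only [if_pos he]
    rw [hstep, PySem.List.foldl_if_eq_foldl_filter]
    rfl
  · simp only [if_neg he]
    obtain ⟨c, rest, hab⟩ : ∃ c rest, ab.1.toList = c :: rest := by
      cases h : ab.1.toList with
      | nil => exact absurd (by rw [← String.ofList_toList (s := ab.1), h]) he
      | cons c rest => exact ⟨c, rest, rfl⟩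
    simp only [hab, List.headD_cons]
    rw [hstep, PySem.List.foldl_if_eq_foldl_filter]
    rw [pvIndex_getD]
    simp only [PySem.Dict.getD_empty, List.nil_append]
    rw [List.filter_filter]
    unfold pvG
    congr 1
    apply List.filter_congr
    intro k _
    cases hin : PySem.Str.isIn ab.1 k with
    | false => exact Bool.false_and _
    | true => rw [Bool.true_and]; exact pvIsIn_head ab.1 k c rest hab hin

-- ===== VERDICT (by name: the statement is the Claim_ definition above) =====
theorem variant_word_handle_dict_spec : Claim_equal_variant_word_handle_dict := by
  intro dict_ pair_list _
  unfold Spec_variant_word_handle_dict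
  rw [pvA_eq, pvB_eq]
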